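-- pv_equiv track=rewrite | github.com/samc0de/misc | python/project_euler/p1/solution.py | get_multiples
-- ===== SOURCE A (Python) =====
-- def get_multiples(root_factors, limit):
--     multiples = []
--     for num in range(1, limit):
--         for factor in root_factors:
--             if num % factor == 0:
--                 multiples.append(num)
--                 break
--
--     return multiples
-- ===== SOURCE B (Python) =====
-- def get_multiples(root_factors, limit):
--     hits = set()
--     for factor in root_factors:
--         if factor:
--             step = abs(factor)
--             hits.update(range(step, limit, step))
--     return sorted(hits)
-- ===== Notes on version B (the rewrite author's own statement) =====
-- stated objective: faster
-- what changed: A scans all factors for every number in range(1, limit); B sweeps once per nonzero factor, collecting its multiples below limit into a set and returning them sorted.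
import Mathlib
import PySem

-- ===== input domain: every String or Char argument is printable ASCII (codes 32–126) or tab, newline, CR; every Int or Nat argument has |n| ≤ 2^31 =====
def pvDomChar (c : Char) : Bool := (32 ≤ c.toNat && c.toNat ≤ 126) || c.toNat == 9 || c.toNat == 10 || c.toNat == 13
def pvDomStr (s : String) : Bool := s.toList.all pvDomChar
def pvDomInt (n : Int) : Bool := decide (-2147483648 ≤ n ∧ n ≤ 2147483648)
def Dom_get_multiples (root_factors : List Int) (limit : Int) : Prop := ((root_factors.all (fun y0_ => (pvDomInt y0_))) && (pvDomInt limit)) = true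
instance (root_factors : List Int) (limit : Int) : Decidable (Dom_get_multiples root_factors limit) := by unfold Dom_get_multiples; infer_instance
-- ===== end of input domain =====

-- B replaces A's per-number scan over the factors by a per-factor sweep: it collects the
-- multiples of each nonzero factor into a set and returns them sorted (objective: faster).

-- ===== PORT A =====
-- inner 'for factor in root_factors' loop with its break: first dividing factor appends num
def getMultiplesInner (acc : List Int) (num : Int) : List Int → List Int
  | [] => acc
  | f :: rest => if PySem.Int.mod num f = 0 then acc ++ [num] else getMultiplesInner acc num rest

def get_multiples (root_factors : List Int) (limit : Int) : List Int :=
  (PySem.List.pyRange 1 limit 1).foldl (fun acc num => getMultiplesInner acc num root_factors) []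

-- ===== PORT B =====
def get_multiples_alt (root_factors : List Int) (limit : Int) : List Int :=
  let hits : PySem.Set Int :=
    root_factors.foldl (fun s factor =>
      if factor ≠ 0 then
        PySem.Set.update s (PySem.List.pyRange (factor.natAbs : Int) limit (factor.natAbs : Int))
      else s)
      PySem.Set.empty
  PySem.List.sorted hits (fun x => x) false

-- ===== PRECONDITION & SPEC =====
-- Pre_ excludes exactly the inputs on which A raises ZeroDivisionError: those where some num in
-- range(1, limit) reaches a zero factor, i.e. 0 occurs in root_factors and some num in the range
-- is divisible by none of the factors preceding the first 0; everywhere A returns, Pre_ holds.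
def Pre_get_multiples (root_factors : List Int) (limit : Int) : Prop :=
  0 ∉ root_factors ∨
    ((PySem.List.pyRange 1 limit 1).all fun y =>
      (root_factors.takeWhile (fun f => f != 0)).any fun f => PySem.Int.mod y f == 0) = true
instance (root_factors : List Int) (limit : Int) : Decidable (Pre_get_multiples root_factors limit) := by unfold Pre_get_multiples; infer_instance

def pvWitness_get_multiples : List Int × Int := ([3, 5], 10)

def Spec_get_multiples (root_factors : List Int) (limit : Int) (out : List Int) : Prop := out = get_multiples_alt root_factors limit
instance (root_factors : List Int) (limit : Int) (out : List Int) : Decidable (Spec_get_multiples root_factors limit out) := by unfold Spec_get_multiples; infer_instance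

-- ===== CLAIM (what is proved, stated in full; the proofs are below) =====
def Claim_equal_get_multiples : Prop := ∀ (root_factors : List Int) (limit : Int), Dom_get_multiples root_factors limit → Pre_get_multiples root_factors limit → Spec_get_multiples root_factors limit (get_multiples root_factors limit)

-- ===== LEMMAS AND PROOFS =====

-- A's inner loop appends num exactly when some factor divides it
theorem getMultiplesInner_eq (num : Int) (fs : List Int) (acc : List Int) :
    getMultiplesInner acc num fs =
      if fs.any (fun f => decide (PySem.Int.mod num f = 0)) then acc ++ [num] else acc := by
  induction fs with
  | nil => simp [getMultiplesInner]
  | cons f rest ih =>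
    simp only [getMultiplesInner, List.any_cons]
    by_cases h : PySem.Int.mod num f = 0 <;> simp [h, ih]

-- A is a filter of range(1, limit)
theorem get_multiples_eq_filter (root_factors : List Int) (limit : Int) :
    get_multiples root_factors limit =
      (PySem.List.pyRange 1 limit 1).filter
        (fun num => root_factors.any (fun f => decide (PySem.Int.mod num f = 0))) := by
  unfold get_multiples
  have : (fun (acc : List Int) num => getMultiplesInner acc num root_factors) =
      (fun acc num =>
        if (fun num => root_factors.any (fun f => decide (PySem.Int.mod num f = 0))) num
        then acc ++ [id num] else acc) := by
    funext acc num
    simpa using getMultiplesInner_eq num root_factors acc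
  rw [this, PySem.List.foldl_append_if]
  simp

-- membership in B's accumulated set
theorem mem_hits (root_factors : List Int) (limit : Int) (s : PySem.Set Int) (y : Int)
    (hs : s.Nodup) :
    (y ∈ root_factors.foldl (fun s factor =>
        if factor ≠ 0 then
          PySem.Set.update s (PySem.List.pyRange (factor.natAbs : Int) limit (factor.natAbs : Int))
        else s) s
      ↔ y ∈ s ∨ ∃ f ∈ root_factors, f ≠ 0 ∧
          y ∈ PySem.List.pyRange (f.natAbs : Int) limit (f.natAbs : Int)) ∧
    (root_factors.foldl (fun s factor =>
        if factor ≠ 0 then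
          PySem.Set.update s (PySem.List.pyRange (factor.natAbs : Int) limit (factor.natAbs : Int))
        else s) s).Nodup := by
  induction root_factors generalizing s with
  | nil => simpa using hs
  | cons f rest ih =>
    by_cases hf : f = 0
    · simp only [List.foldl_cons, hf]
      have := ih s hs
      simp only [ite_not, if_true] at *
      constructor
      · rw [this.1]
        constructor
        · rintro (h | ⟨g, hg, hg0, hy⟩)
          · exact Or.inl h
          · exact Or.inr ⟨g, List.mem_cons_of_mem _ hg, hg0, hy⟩
        · rintro (h | ⟨g, hg, hg0, hy⟩)
          · exact Or.inl h
          · rcases List.mem_cons.mp hg with rfl | hg'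
            · exact absurd rfl hg0
            · exact Or.inr ⟨g, hg', hg0, hy⟩
      · exact this.2
    · simp only [List.foldl_cons, if_pos hf]
      have hnd : (PySem.Set.update s
          (PySem.List.pyRange (f.natAbs : Int) limit (f.natAbs : Int))).Nodup :=
        PySem.Set.nodup_update _ _ hs
      have := ih _ hnd
      constructor
      · rw [this.1, PySem.Set.mem_update]
        constructor
        · rintro ((h | h) | ⟨g, hg, hg0, hy⟩)
          · exact Or.inl h
          · exact Or.inr ⟨f, List.mem_cons_self, hf, h⟩
          · exact Or.inr ⟨g, List.mem_cons_of_mem _ hg, hg0, hy⟩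
        · rintro (h | ⟨g, hg, hg0, hy⟩)
          · exact Or.inl (Or.inl h)
          · rcases List.mem_cons.mp hg with rfl | hg'
            · exact Or.inl (Or.inr hy)
            · exact Or.inr ⟨g, hg', hg0, hy⟩
      · exact this.2

theorem natAbs_range_mem_iff (f : Int) (hf : f ≠ 0) (limit y : Int) :
    y ∈ PySem.List.pyRange (f.natAbs : Int) limit (f.natAbs : Int) ↔
      1 ≤ y ∧ y < limit ∧ f ∣ y := by
  have hpos : (0 : Int) < (f.natAbs : Int) := by
    have := Int.natAbs_pos.mpr hf; exact_mod_cast this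
  rw [PySem.List.mem_pyRange_iff_of_pos hpos]
  constructor
  · rintro ⟨h1, h2, h3⟩
    have hdvd : (f.natAbs : Int) ∣ y := by
      have := dvd_add h3 (dvd_refl (f.natAbs : Int))
      simpa using this
    exact ⟨le_trans (by exact_mod_cast hpos) h1, h2, Int.natAbs_dvd.mp hdvd⟩
  · rintro ⟨h1, h2, h3⟩
    have hdvd : (f.natAbs : Int) ∣ y := Int.natAbs_dvd.mpr h3
    exact ⟨Int.le_of_dvd (by omega) hdvd, h2, dvd_sub hdvd (dvd_refl _)⟩

-- ===== VERDICT (by name: the statement is the Claim_ definition above) =====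
theorem get_multiples_spec : Claim_equal_get_multiples := by
  intro root_factors limit _ hpre
  unfold Spec_get_multiples get_multiples_alt
  rw [get_multiples_eq_filter]
  have hnd := (mem_hits root_factors limit PySem.Set.empty 0 List.nodup_nil).2
  refine (PySem.List.sorted_eq_of_perm_of_pairwise_lt _ _ _ ?_ ?_).symm
  · rw [List.perm_ext_iff_of_nodup
      (List.Nodup.filter _ (PySem.List.nodup_pyRange_one 1 limit)) hnd]
    intro y
    rw [(mem_hits root_factors limit PySem.Set.empty y List.nodup_nil).1]
    simp only [List.mem_filter, PySem.List.mem_pyRange_one, List.any_eq_true,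
      decide_eq_true_eq, PySem.Set.empty, List.not_mem_nil, false_or]
    constructor
    · rintro ⟨⟨h1, h2⟩, f, hf, hmod⟩
      rcases hpre with h0 | hall
      · have hf0 : f ≠ 0 := by rintro rfl; exact h0 hf
        exact ⟨f, hf, hf0, (natAbs_range_mem_iff f hf0 limit y).mpr
          ⟨h1, h2, (PySem.Int.mod_eq_zero_iff_dvd y f).mp hmod⟩⟩
      · have hy : y ∈ PySem.List.pyRange 1 limit 1 := by
          rw [PySem.List.mem_pyRange_one]; exact ⟨h1, h2⟩
        have := (List.all_eq_true.mp hall) y hy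
        obtain ⟨g, hg, hgmod⟩ := List.any_eq_true.mp this
        have hg0' : g ≠ 0 := by
          have hp := List.mem_takeWhile_imp (p := fun f => f != 0) (x := g) (l := root_factors) hg
          simpa using hp
        have hgmem : g ∈ root_factors :=
          List.takeWhile_subset (p := fun f => f != 0) hg
        have hgdvd : g ∣ y := (PySem.Int.mod_eq_zero_iff_dvd y g).mp (by simpa using hgmod)
        exact ⟨g, hgmem, hg0', (natAbs_range_mem_iff g hg0' limit y).mpr ⟨h1, h2, hgdvd⟩⟩
    · rintro ⟨f, hf, hf0, hy⟩
      obtain ⟨h1, h2, h3⟩ := (natAbs_range_mem_iff f hf0 limit y).mp hy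
      exact ⟨⟨h1, h2⟩, f, hf, (PySem.Int.mod_eq_zero_iff_dvd y f).mpr h3⟩
  · exact List.Pairwise.filter _ (PySem.List.pairwise_lt_pyRange_one 1 limit)
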